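-- pv_equiv track=rewrite | github.com/ritamm-018/Smart-Warehouse-Simulator | src/utils/layout_repair.py | _choose_best_position
-- ===== SOURCE A (Python) =====
-- def _choose_best_position(original_shelf, valid_positions):
--     """Choose the best position from valid positions"""
--     if not valid_positions:
--         return None
--
--     # Calculate distances to original position
--     distances = []
--     for pos in valid_positions:
--         distance = abs(pos[0] - original_shelf[0]) + abs(pos[1] - original_shelf[1])
--         distances.append((distance, pos))
--
--     # Sort by distance and choose the closest
--     distances.sort()
--     return distances[0][1]
-- ===== SOURCE B (Python) =====
-- def _choose_best_position(original_shelf, valid_positions):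
--     """Choose the best position from valid positions (single-pass min, no sort)"""
--     if not valid_positions:
--         return None
--
--     def key(p):
--         return (abs(p[0] - original_shelf[0]) + abs(p[1] - original_shelf[1]), p)
--
--     best = valid_positions[0]
--     for p in valid_positions[1:]:
--         if key(p) < key(best):
--             best = p
--     return best
-- ===== Notes on version B (the rewrite author's own statement) =====
-- stated objective: faster
-- what changed: Replaces build-a-(distance,pos)-list-then-sort-and-take-head with a single pass that keeps the current best position under the lexicographic key (manhattan distance, position).
import Mathlib
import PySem

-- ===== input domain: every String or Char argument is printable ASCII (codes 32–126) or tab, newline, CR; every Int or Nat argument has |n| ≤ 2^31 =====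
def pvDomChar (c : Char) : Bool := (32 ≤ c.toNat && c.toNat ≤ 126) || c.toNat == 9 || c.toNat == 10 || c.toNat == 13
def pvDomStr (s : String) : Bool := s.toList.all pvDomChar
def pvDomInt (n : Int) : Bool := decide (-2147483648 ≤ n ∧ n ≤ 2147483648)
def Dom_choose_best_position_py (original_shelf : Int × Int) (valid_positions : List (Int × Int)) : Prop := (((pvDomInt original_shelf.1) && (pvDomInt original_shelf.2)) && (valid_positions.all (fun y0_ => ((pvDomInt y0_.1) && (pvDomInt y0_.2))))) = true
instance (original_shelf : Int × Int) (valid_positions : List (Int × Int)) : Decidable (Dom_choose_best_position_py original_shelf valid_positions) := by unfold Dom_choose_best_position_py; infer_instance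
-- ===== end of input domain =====

-- ===== PORT A =====
-- B replaces A's build-(distance,pos)-list-then-sort by a single-pass running minimum (O(n) scan instead of a sort).
-- Python sorts tuples lexicographically; the sort key 'toLex (t.1, toLex t.2)' encodes exactly that order on (distance, (x, y)).
def choose_best_position_py (original_shelf : Int × Int) (valid_positions : List (Int × Int)) : Option (Int × Int) :=
  if valid_positions = [] then none
  else
    let distances := valid_positions.foldl
      (fun acc pos => acc ++ [((|pos.1 - original_shelf.1| + |pos.2 - original_shelf.2|), pos)]) []
    let ds := PySem.List.sorted distances (fun t => toLex (t.1, toLex t.2)) false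
    match ds with
    | [] => none  -- unreachable: distances is nonempty
    | t :: _ => some t.2

-- ===== PORT B =====
-- the Python key (distance, p), compared lexicographically as Python compares tuples
def pvKeyB (original_shelf : Int × Int) (p : Int × Int) : Lex (Int × Lex (Int × Int)) :=
  toLex ((|p.1 - original_shelf.1| + |p.2 - original_shelf.2|), toLex p)

def choose_best_position_py_alt (original_shelf : Int × Int) (valid_positions : List (Int × Int)) : Option (Int × Int) :=
  match valid_positions with
  | [] => none
  | p :: rest =>
    some (rest.foldl (fun best q =>
      if pvKeyB original_shelf q < pvKeyB original_shelf best then q else best) p)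

-- ===== PRECONDITION & SPEC =====
def Spec_choose_best_position_py (original_shelf : Int × Int) (valid_positions : List (Int × Int)) (out : Option (Int × Int)) : Prop := out = choose_best_position_py_alt original_shelf valid_positions
instance (original_shelf : Int × Int) (valid_positions : List (Int × Int)) (out : Option (Int × Int)) : Decidable (Spec_choose_best_position_py original_shelf valid_positions out) := by unfold Spec_choose_best_position_py; infer_instance

-- ===== CLAIM (what is proved, stated in full; the proofs are below) =====
def Claim_equal_choose_best_position_py : Prop := ∀ (original_shelf : Int × Int) (valid_positions : List (Int × Int)), Dom_choose_best_position_py original_shelf valid_positions → Spec_choose_best_position_py original_shelf valid_positions (choose_best_position_py original_shelf valid_positions)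

-- ===== LEMMAS AND PROOFS =====

-- the key is injective: it carries the position itself in its second component
theorem pvKeyB_inj (os : Int × Int) {p q : Int × Int}
    (h : pvKeyB os p = pvKeyB os q) : p = q := by
  have h2 := congrArg ofLex h
  simp [pvKeyB, Prod.ext_iff] at h2
  exact Prod.ext h2.2.1 h2.2.2

-- invariant of B's single-pass loop: the result is a member and key-minimal
theorem pvFold_min (os : Int × Int) (rest : List (Int × Int)) (p : Int × Int) :
    (rest.foldl (fun best q => if pvKeyB os q < pvKeyB os best then q else best) p) ∈ p :: rest ∧
    ∀ y ∈ p :: rest,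
      pvKeyB os (rest.foldl (fun best q => if pvKeyB os q < pvKeyB os best then q else best) p) ≤ pvKeyB os y := by
  induction rest generalizing p with
  | nil => exact ⟨List.mem_singleton.mpr rfl, by simp⟩
  | cons q t ih =>
    simp only [List.foldl_cons]
    by_cases h : pvKeyB os q < pvKeyB os p
    · have ⟨hm, hmin⟩ := ih q
      rw [if_pos h]
      refine ⟨?_, ?_⟩
      · rcases List.mem_cons.mp hm with h1 | h1
        · rw [h1]; exact List.mem_cons_of_mem _ List.mem_cons_self
        · exact List.mem_cons_of_mem _ (List.mem_cons_of_mem _ h1)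
      · intro y hy
        rcases List.mem_cons.mp hy with rfl | hy
        · exact le_trans (hmin q List.mem_cons_self) (le_of_lt h)
        · exact hmin y hy
    · have ⟨hm, hmin⟩ := ih p
      rw [if_neg h]
      refine ⟨?_, ?_⟩
      · rcases List.mem_cons.mp hm with h1 | h1
        · rw [h1]; exact List.mem_cons_self
        · exact List.mem_cons_of_mem _ (List.mem_cons_of_mem _ h1)
      · intro y hy
        rcases List.mem_cons.mp hy with rfl | hy
        · exact hmin y List.mem_cons_self
        · rcases List.mem_cons.mp hy with rfl | hy
          · exact le_trans (hmin p List.mem_cons_self) (not_lt.mp h)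
          · exact hmin y (List.mem_cons_of_mem _ hy)

-- ===== VERDICT (by name: the statement is the Claim_ definition above) =====
theorem choose_best_position_py_spec : Claim_equal_choose_best_position_py := by
  intro os vps _
  unfold Spec_choose_best_position_py
  match hv : vps with
  | [] => rfl
  | p :: rest =>
    simp only [choose_best_position_py, choose_best_position_py_alt, if_neg (List.cons_ne_nil p rest)]
    rw [PySem.List.foldl_append_singleton_eq_map, List.nil_append]
    set f : (Int × Int) → Int × (Int × Int) :=
      fun pos => ((|pos.1 - os.1| + |pos.2 - os.2|), pos) with hf
    set key : Int × (Int × Int) → Lex (Int × Lex (Int × Int)) :=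
      fun t => toLex (t.1, toLex t.2) with hkey
    have hdne : ((p :: rest).map f) ≠ [] := by simp
    obtain ⟨hmem, hmin⟩ := pvFold_min os rest p
    set b := rest.foldl (fun best q => if pvKeyB os q < pvKeyB os best then q else best) p with hb
    match hs : PySem.List.sorted ((p :: rest).map f) key false with
    | [] => exact absurd ((PySem.List.sorted_eq_nil_iff _ _ _).mp hs) hdne
    | t :: ts =>
      -- t is a member of the mapped list, hence t = f t.2 with t.2 ∈ p :: rest
      have htmem : t ∈ (p :: rest).map f := by
        have := PySem.List.sorted_perm ((p :: rest).map f) key false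
        rw [hs] at this
        exact this.mem_iff.mp List.mem_cons_self
      obtain ⟨x, hx, hfx⟩ := List.mem_map.mp htmem
      -- key t ≤ key (f b)
      have h1 : key t ≤ key (f b) :=
        PySem.List.key_head_sorted_le _ key hs (f b) (List.mem_map_of_mem hmem)
      -- key (f b) = pvKeyB os b, key t = pvKeyB os x
      have hkb : ∀ z : Int × Int, key (f z) = pvKeyB os z := fun z => rfl
      have h2 : pvKeyB os b ≤ pvKeyB os x := hmin x hx
      rw [← hfx, hkb, hkb] at h1
      have : x = b := pvKeyB_inj os (le_antisymm h1 h2)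
      simp [← hfx, this, hf]
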